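-- pv_equiv track=rewrite | github.com/Sdub76/unraid-recovery-toolkit | recovery_analysis.py | bucket_keys_for_path
-- ===== SOURCE A (Python) =====
-- ROOT_BUCKET = "(root)"
--
-- def bucket_keys_for_path(path: str, levels: int):
--     """
--     Given a file path like 'a/b/c/file.ext', return the N+ bucket keys for N in [1..levels].
--     - Use only directory components (exclude the filename).
--     - If the path has fewer than N directory components, use the deepest directory (or ROOT_BUCKET if none).
--     Examples:
--       path='a/b/c/file.ext', levels=4
--         dir_parts = ['a','b','c']
--         level1 -> 'a'
--         level2 -> 'a/b'
--         level3 -> 'a/b/c'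
--         level4 -> 'a/b/c' (stays at deepest dir, since there is no 4th dir)
--       path='file.ext', levels=3
--         dir_parts = []
--         level1 -> '(root)'
--         level2 -> '(root)'
--         level3 -> '(root)'
--     """
--     parts = path.split("/")
--     if not parts:
--         return [ROOT_BUCKET] * levels
--     dir_parts = parts[:-1]  # drop the filename
--     keys = []
--     if len(dir_parts) == 0:
--         keys = [ROOT_BUCKET] * levels
--     else:
--         for n in range(1, levels + 1):
--             if len(dir_parts) >= n:
--                 keys.append("/".join(dir_parts[:n]))
--             else:
--                 keys.append("/".join(dir_parts))
--     return keys
-- ===== SOURCE B (Python) =====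
-- ROOT_BUCKET = "(root)"
--
-- def bucket_keys_for_path(path: str, levels: int):
--     # Precompute cumulative prefixes once, then answer each level by a capped lookup.
--     dir_parts = path.split("/")[:-1]
--     acc = []
--     prefixes = []
--     for part in dir_parts:
--         acc.append(part)
--         prefixes.append("/".join(acc))
--     if not prefixes:
--         prefixes = [ROOT_BUCKET]
--     return [prefixes[min(n, len(prefixes)) - 1] for n in range(1, levels + 1)]
-- ===== Notes on version B (the rewrite author's own statement) =====
-- stated objective: simpler
-- what changed: B precomputes the cumulative '/'-joined prefixes in one pass and answers every level by a capped table lookup prefixes[min(n,len)-1], instead of A's per-level re-slicing and re-joining dir_parts[:n] with an if/else per level and a separate root branch.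
import Mathlib
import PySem

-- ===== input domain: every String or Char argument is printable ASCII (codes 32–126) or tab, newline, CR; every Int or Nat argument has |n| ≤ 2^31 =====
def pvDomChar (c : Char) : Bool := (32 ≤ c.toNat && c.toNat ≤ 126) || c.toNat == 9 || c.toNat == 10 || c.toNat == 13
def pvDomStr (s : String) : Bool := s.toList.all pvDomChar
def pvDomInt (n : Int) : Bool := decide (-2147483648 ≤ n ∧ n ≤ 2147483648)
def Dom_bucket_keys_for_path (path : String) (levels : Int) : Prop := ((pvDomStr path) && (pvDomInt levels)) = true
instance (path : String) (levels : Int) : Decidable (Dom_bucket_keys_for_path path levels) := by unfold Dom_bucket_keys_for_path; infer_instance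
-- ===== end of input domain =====

-- B replaces A's per-level slice-and-join with a one-pass cumulative prefix table and a capped lookup per level (objective: simpler).

-- ===== PORT A =====
def bucket_keys_for_path (path : String) (levels : Int) : List String :=
  -- parts = path.split("/"); sep "/" is nonempty so split? never returns none
  let parts := (PySem.Str.split? path "/").getD []
  if parts = [] then PySem.List.pyRepeat ["(root)"] levels
  else
    let dir_parts := PySem.List.slice parts none (some (-1))   -- parts[:-1]
    if dir_parts.length = 0 then PySem.List.pyRepeat ["(root)"] levels
    else
      (PySem.List.pyRange 1 (levels + 1) 1).foldl
        (fun keys n =>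
          if (dir_parts.length : Int) ≥ n then
            keys ++ [PySem.Str.join "/" (PySem.List.slice dir_parts none (some n))]
          else
            keys ++ [PySem.Str.join "/" dir_parts]) []

-- ===== PORT B =====
def bucket_keys_for_path_alt (path : String) (levels : Int) : List String :=
  let dir_parts := PySem.List.slice ((PySem.Str.split? path "/").getD []) none (some (-1))
  -- one pass: acc grows, prefixes collects "/".join(acc) at each step
  let st := dir_parts.foldl
    (fun (s : List String × List String) part =>
      (s.1 ++ [part], s.2 ++ [PySem.Str.join "/" (s.1 ++ [part])])) ([], [])
  let prefixes := if st.2 = [] then ["(root)"] else st.2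
  (PySem.List.pyRange 1 (levels + 1) 1).map
    (fun n => PySem.List.pyGetD prefixes (min n (prefixes.length : Int) - 1) "")

-- ===== PRECONDITION & SPEC =====
def Spec_bucket_keys_for_path (path : String) (levels : Int) (out : List String) : Prop := out = bucket_keys_for_path_alt path levels
instance (path : String) (levels : Int) (out : List String) : Decidable (Spec_bucket_keys_for_path path levels out) := by unfold Spec_bucket_keys_for_path; infer_instance

-- ===== CLAIM (what is proved, stated in full; the proofs are below) =====
def Claim_equal_bucket_keys_for_path : Prop := ∀ (path : String) (levels : Int), Dom_bucket_keys_for_path path levels → Spec_bucket_keys_for_path path levels (bucket_keys_for_path path levels)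

-- ===== LEMMAS AND PROOFS =====

-- B's one-pass fold computes (acc ++ l, prefixes of a++take over l appended)
theorem pvFoldB (l a p : List String) :
    l.foldl (fun (s : List String × List String) part =>
      (s.1 ++ [part], s.2 ++ [PySem.Str.join "/" (s.1 ++ [part])])) (a, p)
    = (a ++ l, p ++ (List.range l.length).map
        (fun k => PySem.Str.join "/" (a ++ l.take (k + 1)))) := by
  induction l generalizing a p with
  | nil => simp
  | cons x xs ih =>
      simp only [List.foldl_cons, ih, List.length_cons, List.range_succ_eq_map,
        List.map_cons, List.map_map]
      refine Prod.ext (by simp) ?_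
      simp [Function.comp_def, List.take_succ_cons, List.append_assoc]

-- the map over pyRange collapses to replicate "(root)" when there are no directories
theorem pvRootCase (levels : Int) :
    List.replicate levels.toNat "(root)"
      = (PySem.List.pyRange 1 (levels + 1) 1).map
          (fun n => PySem.List.pyGetD ["(root)"] (min n 1 - 1) "") := by
  rw [PySem.List.pyRange_one, List.map_map]
  have hpt : ∀ k ∈ List.range (levels + 1 - 1).toNat,
      ((fun n => PySem.List.pyGetD ["(root)"] (min n 1 - 1) "") ∘ (fun k : Nat => (1:Int) + k)) k
        = (fun _ : Nat => "(root)") k := by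
    intro k _
    have hm : min ((1:Int) + k) 1 - 1 = 0 := by omega
    simp only [Function.comp_apply, hm, PySem.List.pyGetD_zero_cons]
  rw [List.map_congr_left hpt, List.map_const', List.length_range]
  congr 1
  omega

theorem pvMain (parts : List String) (levels : Int) :
    (if parts = [] then PySem.List.pyRepeat ["(root)"] levels
     else
      let dir_parts := PySem.List.slice parts none (some (-1))
      if dir_parts.length = 0 then PySem.List.pyRepeat ["(root)"] levels
      else
        (PySem.List.pyRange 1 (levels + 1) 1).foldl
          (fun keys n =>
            if (dir_parts.length : Int) ≥ n then
              keys ++ [PySem.Str.join "/" (PySem.List.slice dir_parts none (some n))]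
            else
              keys ++ [PySem.Str.join "/" dir_parts]) [])
    =
    (let dir_parts := PySem.List.slice parts none (some (-1))
     let st := dir_parts.foldl
       (fun (s : List String × List String) part =>
         (s.1 ++ [part], s.2 ++ [PySem.Str.join "/" (s.1 ++ [part])])) ([], [])
     let prefixes := if st.2 = [] then ["(root)"] else st.2
     (PySem.List.pyRange 1 (levels + 1) 1).map
       (fun n => PySem.List.pyGetD prefixes (min n (prefixes.length : Int) - 1) "")) := by
  simp only [PySem.List.slice_to_neg_one, pvFoldB, List.nil_append,
    PySem.List.pyRepeat_singleton]
  by_cases hp : parts = []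
  · simpa [hp] using pvRootCase levels
  · simp only [hp, if_false]
    by_cases hl : parts.dropLast.length = 0
    · have hnil : parts.dropLast = [] := List.eq_nil_of_length_eq_zero hl
      simpa [hnil] using pvRootCase levels
    · set l := parts.dropLast with hld
      have hlne : l ≠ [] := fun h => hl (by simp [h])
      have h1le : 1 ≤ l.length := Nat.one_le_iff_ne_zero.mpr (by simpa using hl)
      have hPne : (List.range l.length).map
          (fun k => PySem.Str.join "/" (l.take (k + 1))) ≠ [] := by
        intro h
        have : l.length = 0 := by simpa using congrArg List.length h
        exact hl this
      simp only [hl, if_false, hPne]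
      have hbody : (fun (keys : List String) (n : Int) =>
            if (l.length : Int) ≥ n then
              keys ++ [PySem.Str.join "/" (PySem.List.slice l none (some n))]
            else keys ++ [PySem.Str.join "/" l])
          = fun keys n => keys ++ [if (l.length : Int) ≥ n then
              PySem.Str.join "/" (PySem.List.slice l none (some n))
            else PySem.Str.join "/" l] := by
        funext keys n; split_ifs <;> rfl
      rw [hbody, PySem.List.foldl_append_singleton_eq_map, List.nil_append,
        PySem.List.pyRange_one, List.map_map, List.map_map]
      refine List.map_congr_left (fun k _ => ?_)
      simp only [Function.comp_apply, List.length_map, List.length_range]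
      by_cases hc : (k : Int) + 1 ≤ (l.length : Int)
      · have hk : k + 1 ≤ l.length := by exact_mod_cast hc
        have h1 : (1 : Int) + k = ((k + 1 : Nat) : Int) := by push_cast; ring
        rw [if_pos (by omega), h1, PySem.List.slice_to l (Int.natCast_nonneg _)]
        have h2 : min (((k + 1 : Nat)) : Int) (l.length : Int) - 1 = ((k : Nat) : Int) := by
          omega
        rw [h2, PySem.List.pyGetD_natCast]
        simp [List.getD_eq_getElem?_getD, Nat.lt_of_succ_le hk]
      · have h2 : min ((1:Int) + k) (l.length : Int) - 1 = ((l.length - 1 : Nat) : Int) := by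
          omega
        rw [if_neg (by omega), h2, PySem.List.pyGetD_natCast]
        have hlt : l.length - 1 < l.length := by omega
        simp only [List.getD_eq_getElem?_getD, List.getElem?_map, List.getElem?_range, hlt,
          Option.map_some, Option.getD_some]
        rw [Nat.sub_add_cancel h1le, List.take_length]

-- ===== VERDICT (by name: the statement is the Claim_ definition above) =====
theorem bucket_keys_for_path_spec : Claim_equal_bucket_keys_for_path := by
  intro path levels _
  unfold Spec_bucket_keys_for_path bucket_keys_for_path bucket_keys_for_path_alt
  exact pvMain ((PySem.Str.split? path "/").getD []) levels
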